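-- pv_equiv track=rewrite | github.com/ihamsvs/programming-tests | python/indexing.py | multilevel_index
-- ===== SOURCE A (Python) =====
-- def multilevel_index(documents, keys):
--     # Inicializar el diccionario resultante
--     result_dict = {}
--
--     # Iterar sobre cada documento en la lista
--     for document in documents:
--         # Obtener el valor de la primera llave
--         key1 = document[keys[0]]
--         # Obtener el valor de la segunda llave
--         key2 = document[keys[1]]
--
--         # Si el valor de la primera llave no está en el diccionario resultante, agregarlo
--         if key1 not in result_dict:
--             result_dict[key1] = {}
--
--         # Si el valor de la segunda llave no está en el diccionario correspondiente, agregarlo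
--         if key2 not in result_dict[key1]:
--             result_dict[key1][key2] = []
--
--         # Agregar el documento al grupo correspondiente en el diccionario resultante
--         result_dict[key1][key2].append(document)
--
--     # Retornar el diccionario resultante
--     return result_dict
-- ===== SOURCE B (Python) =====
-- def _group(docs, get_key):
--     """One flat grouping pass: key -> list of docs, insertion-ordered."""
--     groups = {}
--     for document in docs:
--         groups.setdefault(get_key(document), []).append(document)
--     return groups
--
--
-- def multilevel_index(documents, keys):
--     # pass 1: flat grouping by the first key
--     flat = _group(documents, lambda d: d[keys[0]])
--     # pass 2: regroup each bucket by the second key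
--     return {key1: _group(group, lambda d: d[keys[1]])
--             for key1, group in flat.items()}
-- ===== Notes on version B (the rewrite author's own statement) =====
-- stated objective: idiomatic
-- what changed: A builds the nested dict in one interleaved pass with explicit membership tests and in-place nested mutation; B decomposes into two sequential shaped passes through a single reusable one-level grouping helper (setdefault) - first grouping all documents by key1, then regrouping each flat bucket by key2 in a dict comprehension - preserving the same insertion orders.
import Mathlib
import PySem

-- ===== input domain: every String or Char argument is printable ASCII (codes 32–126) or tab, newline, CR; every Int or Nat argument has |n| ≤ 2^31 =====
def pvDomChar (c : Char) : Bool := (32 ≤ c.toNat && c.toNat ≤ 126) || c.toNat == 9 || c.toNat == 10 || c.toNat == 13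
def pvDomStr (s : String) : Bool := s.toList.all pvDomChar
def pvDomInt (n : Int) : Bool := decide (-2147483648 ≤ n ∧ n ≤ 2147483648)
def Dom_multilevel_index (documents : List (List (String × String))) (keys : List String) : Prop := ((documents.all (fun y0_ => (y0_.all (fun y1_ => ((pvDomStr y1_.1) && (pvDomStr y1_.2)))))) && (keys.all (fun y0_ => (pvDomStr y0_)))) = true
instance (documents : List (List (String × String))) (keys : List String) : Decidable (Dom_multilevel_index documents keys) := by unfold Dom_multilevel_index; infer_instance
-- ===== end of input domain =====

-- B replaces A's single interleaved nested-dict pass by two sequential flat grouping passes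
-- (one reusable one-level grouping helper applied twice); same return value, same insertion orders.


-- shared helper: document[k] (Python dict lookup); the "" default is never reached on inputs
-- admitted by Pre_ (the key is present there)
def docVal (document : List (String × String)) (k : String) : String :=
  ((PySem.Dict.mk document).get? k).getD ""

-- ===== PORT A =====
-- A's loop body, transliterated line by line (result_dict[key1][key2].append(document) is the
-- in-place append written back with insert, which overwrites in place)
def pvStepA (keys : List String)
    (rd : PySem.Dict String (PySem.Dict String (List (List (String × String)))))
    (document : List (String × String)) :
    PySem.Dict String (PySem.Dict String (List (List (String × String)))) :=
  let key1 := docVal document ((PySem.List.pyGet? keys 0).getD "")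
  let key2 := docVal document ((PySem.List.pyGet? keys 1).getD "")
  let rd := if rd.contains key1 then rd else rd.insert key1 PySem.Dict.empty
  let inner := rd.getD key1 PySem.Dict.empty
  let inner := if inner.contains key2 then inner else inner.insert key2 []
  let inner := inner.modify key2 [] (· ++ [document])
  rd.insert key1 inner

def multilevel_index (documents : List (List (String × String))) (keys : List String) : List (String × List (String × List (List (String × String)))) :=
  let result_dict := documents.foldl (pvStepA keys) PySem.Dict.empty
  result_dict.items.map (fun p => (p.1, p.2.items))

-- ===== PORT B =====
-- _group(docs, get_key): groups.setdefault(get_key(document), []).append(document) is exactly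
-- groups[k] = groups.get(k, []) + [document], i.e. Dict.modify (same position/order semantics)
def pvGroup (docs : List (List (String × String))) (getKey : List (String × String) → String) : PySem.Dict String (List (List (String × String))) :=
  docs.foldl (fun groups document => groups.modify (getKey document) [] (· ++ [document])) PySem.Dict.empty

def multilevel_index_alt (documents : List (List (String × String))) (keys : List String) : List (String × List (String × List (List (String × String)))) :=
  let flat := pvGroup documents (fun d => docVal d ((PySem.List.pyGet? keys 0).getD ""))
  flat.items.map (fun p =>
    (p.1, (pvGroup p.2 (fun d => docVal d ((PySem.List.pyGet? keys 1).getD ""))).items))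

-- ===== PRECONDITION & SPEC =====
-- Pre_ excludes exactly the inputs where Python A raises (IndexError: fewer than two keys while
-- documents is nonempty, or KeyError: a document missing one of the two keys); A returns elsewhere.
def Pre_multilevel_index (documents : List (List (String × String))) (keys : List String) : Prop :=
  ∀ d ∈ documents, 2 ≤ keys.length ∧
    (PySem.Dict.mk d).contains (keys.getD 0 "") = true ∧
    (PySem.Dict.mk d).contains (keys.getD 1 "") = true
instance (documents : List (List (String × String))) (keys : List String) : Decidable (Pre_multilevel_index documents keys) := by unfold Pre_multilevel_index; infer_instance

def pvWitness_multilevel_index : (List (List (String × String))) × List String :=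
  ([[("a", "x"), ("b", "y")], [("a", "x"), ("b", "z")]], ["a", "b"])

def Spec_multilevel_index (documents : List (List (String × String))) (keys : List String) (out : List (String × List (String × List (List (String × String))))) : Prop := out = multilevel_index_alt documents keys
instance (documents : List (List (String × String))) (keys : List String) (out : List (String × List (String × List (List (String × String))))) : Decidable (Spec_multilevel_index documents keys out) := by
  unfold Spec_multilevel_index
  haveI : DecidableEq (String × List (String × List (List (String × String)))) := instDecidableEqProd
  haveI : DecidableEq (List (String × List (String × List (List (String × String))))) := instDecidableEqList
  infer_instance

-- ===== CLAIM (what is proved, stated in full; the proofs are below) =====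
def Claim_equal_multilevel_index : Prop := ∀ (documents : List (List (String × String))) (keys : List String), Dom_multilevel_index documents keys → Pre_multilevel_index documents keys → Spec_multilevel_index documents keys (multilevel_index documents keys)

-- ===== LEMMAS AND PROOFS =====

-- map a function over the values of a dict, keeping keys and their order
def pvMapVal {ν ν' : Type} (d : PySem.Dict String ν) (H : ν → ν') : PySem.Dict String ν' :=
  PySem.Dict.mk (d.items.map (fun p => (p.1, H p.2)))

theorem contains_pvMapVal {ν ν' : Type} (d : PySem.Dict String ν) (H : ν → ν') (k : String) :
    (pvMapVal d H).contains k = d.contains k := by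
  simp [pvMapVal, PySem.Dict.contains, List.any_map, Function.comp_def]

theorem get?_pvMapVal {ν ν' : Type} (d : PySem.Dict String ν) (H : ν → ν') (k : String) :
    (pvMapVal d H).get? k = (d.get? k).map H := by
  obtain ⟨items⟩ := d
  induction items with
  | nil => rfl
  | cons p rest ih =>
    by_cases h : (p.1 == k) = true
    · simp [pvMapVal, PySem.Dict.get?, h]
    · have := ih
      simp only [pvMapVal, PySem.Dict.get?, List.map_cons, List.find?_cons, h] at this ⊢
      exact this

theorem getD_pvMapVal {ν ν' : Type} (d : PySem.Dict String ν) (H : ν → ν') (k : String) (c : ν) :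
    (pvMapVal d H).getD k (H c) = H (d.getD k c) := by
  simp only [PySem.Dict.getD, get?_pvMapVal]
  cases d.get? k <;> rfl

theorem insert_pvMapVal {ν ν' : Type} (d : PySem.Dict String ν) (H : ν → ν') (k : String) (v : ν) :
    (pvMapVal d H).insert k (H v) = pvMapVal (d.insert k v) H := by
  simp only [PySem.Dict.insert, contains_pvMapVal]
  by_cases h : d.contains k <;> simp only [h, if_true, if_false, Bool.false_eq_true]
  · apply PySem.Dict.ext
    simp only [pvMapVal, List.map_map]
    refine List.map_congr_left (fun p _ => ?_)
    by_cases hp : p.1 = k <;> simp [hp]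
  · apply PySem.Dict.ext
    simp [pvMapVal]

theorem modify_pvMapVal {ν ν' : Type} (d : PySem.Dict String ν) (H : ν → ν') (k : String)
    (c : ν) (c' : ν') (φ : ν → ν) (F : ν' → ν')
    (hc : c' = H c) (hF : ∀ b, F (H b) = H (φ b)) :
    (pvMapVal d H).modify k c' F = pvMapVal (d.modify k c φ) H := by
  simp only [PySem.Dict.modify, hc, getD_pvMapVal, hF, insert_pvMapVal]

theorem dict_if_getD {ν : Type} (d : PySem.Dict String ν) (k : String) (c : ν) :
    (if d.contains k then d else d.insert k c).getD k c = d.getD k c := by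
  split_ifs with h
  · rfl
  · rw [PySem.Dict.getD_insert_self]
    exact (PySem.Dict.getD_of_not_contains d c (by simpa using h)).symm

theorem dict_if_insert {ν : Type} (d : PySem.Dict String ν) (k : String) (c v : ν) :
    (if d.contains k then d else d.insert k c).insert k v = d.insert k v := by
  split_ifs with h
  · rfl
  · rw [PySem.Dict.insert_insert_self]

theorem dict_if_modify {ν : Type} (d : PySem.Dict String ν) (k : String) (c : ν) (f : ν → ν) :
    (if d.contains k then d else d.insert k c).modify k c f = d.modify k c f := by
  simp only [PySem.Dict.modify, dict_if_getD, dict_if_insert]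

-- A's loop body is one nested dict update
theorem pvStepA_eq (keys : List String)
    (rd : PySem.Dict String (PySem.Dict String (List (List (String × String)))))
    (document : List (String × String)) :
    pvStepA keys rd document
    = rd.modify (docVal document ((PySem.List.pyGet? keys 0).getD "")) PySem.Dict.empty
        (fun inner => inner.modify (docVal document ((PySem.List.pyGet? keys 1).getD "")) [] (· ++ [document])) := by
  unfold pvStepA
  simp only [dict_if_modify, dict_if_getD, dict_if_insert]
  rfl

-- A's nested fold is: flat grouping by the first key, with every bucket grouped by the second key
theorem nested_fold_eq (keys : List String) (docs : List (List (String × String))) :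
    ∀ grp : PySem.Dict String (List (List (String × String))),
    docs.foldl (pvStepA keys)
        (pvMapVal grp (fun b => pvGroup b (fun d => docVal d ((PySem.List.pyGet? keys 1).getD ""))))
    = pvMapVal
        (docs.foldl (fun groups document =>
          groups.modify (docVal document ((PySem.List.pyGet? keys 0).getD "")) [] (· ++ [document])) grp)
        (fun b => pvGroup b (fun d => docVal d ((PySem.List.pyGet? keys 1).getD ""))) := by
  induction docs with
  | nil => intro grp; rfl
  | cons doc rest ih =>
    intro grp
    have hstep := modify_pvMapVal grp
      (fun b => pvGroup b (fun d => docVal d ((PySem.List.pyGet? keys 1).getD "")))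
      (docVal doc ((PySem.List.pyGet? keys 0).getD ""))
      [] PySem.Dict.empty (· ++ [doc])
      (fun inner => inner.modify (docVal doc ((PySem.List.pyGet? keys 1).getD "")) [] (· ++ [doc]))
      rfl
      (fun b => by simp [pvGroup, List.foldl_append])
    rw [List.foldl_cons, List.foldl_cons, pvStepA_eq, hstep, ih]

-- ===== VERDICT (by name: the statement is the Claim_ definition above) =====
theorem multilevel_index_spec : Claim_equal_multilevel_index := by
  intro documents keys _ _
  show (List.foldl (pvStepA keys) PySem.Dict.empty documents).items.map (fun p => (p.1, p.2.items))
      = (pvGroup documents (fun d => docVal d ((PySem.List.pyGet? keys 0).getD ""))).items.map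
          (fun p => (p.1, (pvGroup p.2 (fun d => docVal d ((PySem.List.pyGet? keys 1).getD ""))).items))
  have h := nested_fold_eq keys documents PySem.Dict.empty
  rw [show pvMapVal (PySem.Dict.empty : PySem.Dict String (List (List (String × String))))
        (fun b => pvGroup b (fun d => docVal d ((PySem.List.pyGet? keys 1).getD "")))
      = PySem.Dict.empty from rfl] at h
  rw [h]
  simp [pvMapVal, pvGroup, List.map_map, Function.comp_def]
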